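-- pv_equiv track=rewrite | github.com/Twodragon0/tech-blog | scripts/news/svg_generator.py | _match_svg_icon
-- ===== SOURCE A (Python) =====
-- from typing import Dict, List, Optional
--
-- def _svg_icon_templates() -> Dict[str, str]:
--     return {
--         "malware": '<circle r="16" fill="{c}" opacity="0.2"/><circle cx="-12" cy="-8" r="6" fill="{c}" opacity="0.5"/><circle cx="12" cy="8" r="6" fill="{c}" opacity="0.5"/><circle cx="8" cy="-12" r="4" fill="{c}" opacity="0.4"/>',
--         "ransom": '<rect x="-22" y="-4" width="44" height="36" rx="8" fill="#221617" stroke="{c}" stroke-width="2"/><path d="M-12 -4 v-16 c0-18 24-18 24 0 v16" stroke="{c}" stroke-width="4" fill="none" stroke-linecap="round"/><circle cx="0" cy="16" r="6" fill="{c}"/><rect x="-2" y="20" width="4" height="10" rx="2" fill="{c}"/>',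
--         "phish": '<path d="M-20 -8 L0 12 L20 -8" fill="none" stroke="{c}" stroke-width="3" stroke-linecap="round"/><rect x="-24" y="-16" width="48" height="36" rx="4" fill="none" stroke="{c}" stroke-width="2"/><circle cx="0" cy="-24" r="4" fill="{c}"/>',
--         "cve": '<rect x="-20" y="-16" width="40" height="32" rx="6" fill="#1a1020" stroke="{c}" stroke-width="2"/><text x="0" y="-2" font-family="Courier New" font-size="11" font-weight="700" fill="{c}" text-anchor="middle">CVE</text><text x="0" y="12" font-family="Courier New" font-size="8" fill="{c}" text-anchor="middle" opacity="0.7">PATCH</text>',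
--         "cloud": '<path d="M-16 10 C-28 10 -32 -2 -32 -10 C-32 -20 -24 -26 -14 -26 C-10 -36 0 -42 10 -42 C24 -42 32 -32 32 -26 C40 -26 44 -20 44 -10 C44 -2 40 10 28 10 Z" fill="#0b1628" stroke="{c}" stroke-width="2" transform="scale(0.7)"/>',
--         "ai": '<rect x="-28" y="-20" width="56" height="40" rx="8" fill="#111c35" stroke="{c}" stroke-width="2"/><circle cx="0" cy="-4" r="14" fill="#12345c" stroke="{c}" stroke-width="1.5"/><text x="0" y="1" font-family="Arial" font-size="12" font-weight="700" fill="{c}" text-anchor="middle">AI</text>',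
--         "k8s": '<circle cx="-16" cy="-12" r="12" fill="#09261d" stroke="{c}" stroke-width="1.5"/><circle cx="16" cy="-12" r="12" fill="#09261d" stroke="{c}" stroke-width="1.5"/><circle cx="0" cy="16" r="12" fill="#09261d" stroke="{c}" stroke-width="1.5"/><path d="M-8 -6 L8 -6 M-12 2 L0 14 M12 2 L0 14" stroke="{c}" stroke-width="1.5"/>',
--         "dns": '<circle r="16" fill="{c}" opacity="0.15"/><circle cx="-10" cy="-6" r="5" fill="{c}" opacity="0.6"/><circle cx="10" cy="6" r="5" fill="{c}" opacity="0.6"/><circle cx="12" cy="-10" r="3" fill="{c}" opacity="0.4"/>',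
--         "edr": '<rect x="-22" y="-18" width="44" height="36" rx="6" fill="#0f172a" stroke="{c}" stroke-width="2"/><path d="M-12 -6 L-4 6 L14 -10" fill="none" stroke="{c}" stroke-width="3" stroke-linecap="round"/><line x1="-14" y1="14" x2="14" y2="14" stroke="{c}" stroke-width="1.5" opacity="0.5"/>',
--         "default": '<circle r="18" fill="{c}" opacity="0.18"/><circle r="8" fill="{c}" opacity="0.3"/>',
--     }
--
-- def _match_svg_icon(label: str) -> str:
--     lbl = label.lower()
--     for key in _svg_icon_templates():
--         if key in lbl:
--             return key
--     if any(k in lbl for k in ["exploit", "vuln", "patch", "zero"]):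
--         return "cve"
--     if any(k in lbl for k in ["encrypt", "lock", "ransom"]):
--         return "ransom"
--     if any(k in lbl for k in ["aws", "gcp", "azure", "cloud"]):
--         return "cloud"
--     if any(k in lbl for k in ["agent", "llm", "model"]):
--         return "ai"
--     if any(k in lbl for k in ["k8s", "kube", "gke", "eks"]):
--         return "k8s"
--     if any(k in lbl for k in ["bot", "worm", "trojan"]):
--         return "malware"
--     return "default"
-- ===== SOURCE B (Python) =====
-- # B: one flat keyword->(priority, key) table; collect ALL matching keywords in a
-- # single comprehension, then return the minimum-priority hit (min over all matches
-- # instead of A's ordered early-return scan with separate any() fallback guards).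
-- _KEYWORD_TABLE = [
--     ("malware", (0, "malware")),
--     ("ransom", (1, "ransom")),
--     ("phish", (2, "phish")),
--     ("cve", (3, "cve")),
--     ("cloud", (4, "cloud")),
--     ("ai", (5, "ai")),
--     ("k8s", (6, "k8s")),
--     ("dns", (7, "dns")),
--     ("edr", (8, "edr")),
--     ("default", (9, "default")),
--     ("exploit", (10, "cve")), ("vuln", (10, "cve")), ("patch", (10, "cve")), ("zero", (10, "cve")),
--     ("encrypt", (11, "ransom")), ("lock", (11, "ransom")), ("ransom", (11, "ransom")),
--     ("aws", (12, "cloud")), ("gcp", (12, "cloud")), ("azure", (12, "cloud")), ("cloud", (12, "cloud")),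
--     ("agent", (13, "ai")), ("llm", (13, "ai")), ("model", (13, "ai")),
--     ("k8s", (14, "k8s")), ("kube", (14, "k8s")), ("gke", (14, "k8s")), ("eks", (14, "k8s")),
--     ("bot", (15, "malware")), ("worm", (15, "malware")), ("trojan", (15, "malware")),
-- ]
--
-- def _match_svg_icon(label: str) -> str:
--     lbl = label.lower()
--     hits = [pk for kw, pk in _KEYWORD_TABLE if kw in lbl]
--     return min(hits)[1] if hits else "default"
-- ===== Notes on version B (the rewrite author's own statement) =====
-- stated objective: alternative
-- what changed: Instead of A's ordered early-return scan (dict-key loop plus six any() fallback guards), B flattens everything into one keyword -> (priority, key) table, collects ALL keywords occurring in the lowercased label in a single comprehension, and returns the key of the minimum-priority hit (Python min over tuples), falling back to the sentinel key when nothing matches; correctness holds because the minimum priority among matches coincides with the first rule A's scan would hit.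
import Mathlib
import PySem

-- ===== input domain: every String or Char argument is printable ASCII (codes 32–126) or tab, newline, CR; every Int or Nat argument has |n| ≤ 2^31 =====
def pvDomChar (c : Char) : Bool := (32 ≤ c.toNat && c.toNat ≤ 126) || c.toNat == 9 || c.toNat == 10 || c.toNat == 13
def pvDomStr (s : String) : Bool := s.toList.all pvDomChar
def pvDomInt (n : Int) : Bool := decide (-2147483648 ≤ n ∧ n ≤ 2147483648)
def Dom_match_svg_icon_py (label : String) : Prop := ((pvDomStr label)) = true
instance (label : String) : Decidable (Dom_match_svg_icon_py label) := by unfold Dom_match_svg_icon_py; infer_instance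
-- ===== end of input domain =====

-- B replaces A's ordered early-return scan (dict-key loop + six any() fallback guards) by a
-- flat keyword → (priority, key) table: collect ALL matching keywords, return the
-- minimum-priority hit (objective: alternative — gather-then-minimise vs first-match-wins).

-- ===== PORT A =====
-- _svg_icon_templates(): the dict whose keys the loop iterates (insertion order).
def pvSvgIconTemplates : PySem.Dict String String := PySem.Dict.ofList [
  ("malware", "<circle r=\"16\" fill=\"{c}\" opacity=\"0.2\"/><circle cx=\"-12\" cy=\"-8\" r=\"6\" fill=\"{c}\" opacity=\"0.5\"/><circle cx=\"12\" cy=\"8\" r=\"6\" fill=\"{c}\" opacity=\"0.5\"/><circle cx=\"8\" cy=\"-12\" r=\"4\" fill=\"{c}\" opacity=\"0.4\"/>"),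
  ("ransom", "<rect x=\"-22\" y=\"-4\" width=\"44\" height=\"36\" rx=\"8\" fill=\"#221617\" stroke=\"{c}\" stroke-width=\"2\"/><path d=\"M-12 -4 v-16 c0-18 24-18 24 0 v16\" stroke=\"{c}\" stroke-width=\"4\" fill=\"none\" stroke-linecap=\"round\"/><circle cx=\"0\" cy=\"16\" r=\"6\" fill=\"{c}\"/><rect x=\"-2\" y=\"20\" width=\"4\" height=\"10\" rx=\"2\" fill=\"{c}\"/>"),
  ("phish", "<path d=\"M-20 -8 L0 12 L20 -8\" fill=\"none\" stroke=\"{c}\" stroke-width=\"3\" stroke-linecap=\"round\"/><rect x=\"-24\" y=\"-16\" width=\"48\" height=\"36\" rx=\"4\" fill=\"none\" stroke=\"{c}\" stroke-width=\"2\"/><circle cx=\"0\" cy=\"-24\" r=\"4\" fill=\"{c}\"/>"),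
  ("cve", "<rect x=\"-20\" y=\"-16\" width=\"40\" height=\"32\" rx=\"6\" fill=\"#1a1020\" stroke=\"{c}\" stroke-width=\"2\"/><text x=\"0\" y=\"-2\" font-family=\"Courier New\" font-size=\"11\" font-weight=\"700\" fill=\"{c}\" text-anchor=\"middle\">CVE</text><text x=\"0\" y=\"12\" font-family=\"Courier New\" font-size=\"8\" fill=\"{c}\" text-anchor=\"middle\" opacity=\"0.7\">PATCH</text>"),
  ("cloud", "<path d=\"M-16 10 C-28 10 -32 -2 -32 -10 C-32 -20 -24 -26 -14 -26 C-10 -36 0 -42 10 -42 C24 -42 32 -32 32 -26 C40 -26 44 -20 44 -10 C44 -2 40 10 28 10 Z\" fill=\"#0b1628\" stroke=\"{c}\" stroke-width=\"2\" transform=\"scale(0.7)\"/>"),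
  ("ai", "<rect x=\"-28\" y=\"-20\" width=\"56\" height=\"40\" rx=\"8\" fill=\"#111c35\" stroke=\"{c}\" stroke-width=\"2\"/><circle cx=\"0\" cy=\"-4\" r=\"14\" fill=\"#12345c\" stroke=\"{c}\" stroke-width=\"1.5\"/><text x=\"0\" y=\"1\" font-family=\"Arial\" font-size=\"12\" font-weight=\"700\" fill=\"{c}\" text-anchor=\"middle\">AI</text>"),
  ("k8s", "<circle cx=\"-16\" cy=\"-12\" r=\"12\" fill=\"#09261d\" stroke=\"{c}\" stroke-width=\"1.5\"/><circle cx=\"16\" cy=\"-12\" r=\"12\" fill=\"#09261d\" stroke=\"{c}\" stroke-width=\"1.5\"/><circle cx=\"0\" cy=\"16\" r=\"12\" fill=\"#09261d\" stroke=\"{c}\" stroke-width=\"1.5\"/><path d=\"M-8 -6 L8 -6 M-12 2 L0 14 M12 2 L0 14\" stroke=\"{c}\" stroke-width=\"1.5\"/>"),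
  ("dns", "<circle r=\"16\" fill=\"{c}\" opacity=\"0.15\"/><circle cx=\"-10\" cy=\"-6\" r=\"5\" fill=\"{c}\" opacity=\"0.6\"/><circle cx=\"10\" cy=\"6\" r=\"5\" fill=\"{c}\" opacity=\"0.6\"/><circle cx=\"12\" cy=\"-10\" r=\"3\" fill=\"{c}\" opacity=\"0.4\"/>"),
  ("edr", "<rect x=\"-22\" y=\"-18\" width=\"44\" height=\"36\" rx=\"6\" fill=\"#0f172a\" stroke=\"{c}\" stroke-width=\"2\"/><path d=\"M-12 -6 L-4 6 L14 -10\" fill=\"none\" stroke=\"{c}\" stroke-width=\"3\" stroke-linecap=\"round\"/><line x1=\"-14\" y1=\"14\" x2=\"14\" y2=\"14\" stroke=\"{c}\" stroke-width=\"1.5\" opacity=\"0.5\"/>"),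
  ("default", "<circle r=\"18\" fill=\"{c}\" opacity=\"0.18\"/><circle r=\"8\" fill=\"{c}\" opacity=\"0.3\"/>")
]

-- the post-loop fallback chain of A (the six any() guards and the final return)
def pvAFallback (lbl : String) : String :=
  if (["exploit", "vuln", "patch", "zero"].any fun k => PySem.Str.isIn k lbl) then "cve"
  else if (["encrypt", "lock", "ransom"].any fun k => PySem.Str.isIn k lbl) then "ransom"
  else if (["aws", "gcp", "azure", "cloud"].any fun k => PySem.Str.isIn k lbl) then "cloud"
  else if (["agent", "llm", "model"].any fun k => PySem.Str.isIn k lbl) then "ai"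
  else if (["k8s", "kube", "gke", "eks"].any fun k => PySem.Str.isIn k lbl) then "k8s"
  else if (["bot", "worm", "trojan"].any fun k => PySem.Str.isIn k lbl) then "malware"
  else "default"

-- the 'for key in _svg_icon_templates():' loop; on exhaustion control falls through to the guards
def pvALoop (lbl : String) : List String → String
  | [] => pvAFallback lbl
  | k :: ks => if PySem.Str.isIn k lbl then k else pvALoop lbl ks

def match_svg_icon_py (label : String) : String :=
  let lbl := PySem.Str.lower label
  pvALoop lbl (pvSvgIconTemplates.keys)

-- ===== PORT B =====
-- _KEYWORD_TABLE: keyword → (priority, key)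
def pvKeywordTable : List (String × Int × String) := [
  ("malware", (0, "malware")),
  ("ransom", (1, "ransom")),
  ("phish", (2, "phish")),
  ("cve", (3, "cve")),
  ("cloud", (4, "cloud")),
  ("ai", (5, "ai")),
  ("k8s", (6, "k8s")),
  ("dns", (7, "dns")),
  ("edr", (8, "edr")),
  ("default", (9, "default")),
  ("exploit", (10, "cve")), ("vuln", (10, "cve")), ("patch", (10, "cve")), ("zero", (10, "cve")),
  ("encrypt", (11, "ransom")), ("lock", (11, "ransom")), ("ransom", (11, "ransom")),
  ("aws", (12, "cloud")), ("gcp", (12, "cloud")), ("azure", (12, "cloud")), ("cloud", (12, "cloud")),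
  ("agent", (13, "ai")), ("llm", (13, "ai")), ("model", (13, "ai")),
  ("k8s", (14, "k8s")), ("kube", (14, "k8s")), ("gke", (14, "k8s")), ("eks", (14, "k8s")),
  ("bot", (15, "malware")), ("worm", (15, "malware")), ("trojan", (15, "malware"))]

-- Python's '<' on (int, str) tuples: lexicographic (priorities here decide before the string)
def pvPairLt (x y : Int × String) : Bool :=
  decide (x.1 < y.1) || (x.1 == y.1 && decide (x.2 < y.2))

def match_svg_icon_py_alt (label : String) : String :=
  let lbl := PySem.Str.lower label
  -- hits = [pk for kw, pk in _KEYWORD_TABLE if kw in lbl]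
  let hits := (pvKeywordTable.filter fun p => PySem.Str.isIn p.1 lbl).map Prod.snd
  -- min(hits)[1] if hits else "default"   (min = running lexicographic minimum, first on ties)
  match hits with
  | [] => "default"
  | h :: t => (t.foldl (fun b x => if pvPairLt x b then x else b) h).2

-- ===== PRECONDITION & SPEC =====
def Spec_match_svg_icon_py (label : String) (out : String) : Prop := out = match_svg_icon_py_alt label
instance (label : String) (out : String) : Decidable (Spec_match_svg_icon_py label out) := by unfold Spec_match_svg_icon_py; infer_instance

-- ===== CLAIM (what is proved, stated in full; the proofs are below) =====
def Claim_equal_match_svg_icon_py : Prop := ∀ (label : String), Dom_match_svg_icon_py label → Spec_match_svg_icon_py label (match_svg_icon_py label)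

-- ===== LEMMAS AND PROOFS =====

-- first-match scan over the flat table (proof-only bridge between the two ports)
def pvScanT (lbl : String) : List (String × Int × String) → String
  | [] => "default"
  | p :: rest => if PySem.Str.isIn p.1 lbl then p.2.2 else pvScanT lbl rest

-- the table is priority-sorted: any later entry carries the same (priority, key) pair
-- or a strictly larger priority
theorem pvTable_pairwise :
    pvKeywordTable.Pairwise (fun a b => a.2 = b.2 ∨ a.2.1 < b.2.1) := by decide

theorem pvKeys_eq : pvSvgIconTemplates.keys =
    ["malware", "ransom", "phish", "cve", "cloud", "ai", "k8s", "dns", "edr", "default"] := by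
  decide

-- the running lexicographic minimum of h :: t is h when nothing in t beats h
theorem pvFoldlMin_head (h : Int × String) (t : List (Int × String))
    (hle : ∀ x ∈ t, x = h ∨ h.1 < x.1) :
    t.foldl (fun b x => if pvPairLt x b then x else b) h = h := by
  induction t with
  | nil => rfl
  | cons x t ih =>
    have hx : x = h ∨ h.1 < x.1 := hle x (by simp)
    have hlt : pvPairLt x h = false := by
      rcases hx with rfl | hlt
      · simp [pvPairLt]
      · simp [pvPairLt]; omega
    rw [List.foldl_cons, if_neg (by simp [hlt])]
    exact ih (fun y hy => hle y (by simp [hy]))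

-- B's gather-then-minimise over a priority-sorted table equals the first-match scan
theorem pvMin_eq_scan (lbl : String) (l : List (String × Int × String))
    (hp : l.Pairwise (fun a b => a.2 = b.2 ∨ a.2.1 < b.2.1)) :
    (match (l.filter fun p => PySem.Str.isIn p.1 lbl).map Prod.snd with
      | [] => "default"
      | h :: t => (t.foldl (fun b x => if pvPairLt x b then x else b) h).2)
      = pvScanT lbl l := by
  induction l with
  | nil => rfl
  | cons p l ih =>
    rcases List.pairwise_cons.mp hp with ⟨hph, hpl⟩
    by_cases hm : PySem.Str.isIn p.1 lbl = true
    · rw [List.filter_cons, if_pos hm, List.map_cons]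
      have hthis : ∀ x ∈ (l.filter fun q => PySem.Str.isIn q.1 lbl).map Prod.snd,
          x = p.2 ∨ p.2.1 < x.1 := by
        intro x hx
        rcases List.mem_map.mp hx with ⟨q, hq, rfl⟩
        rcases hph q (List.mem_of_mem_filter hq) with h | h
        · exact Or.inl h.symm
        · exact Or.inr h
      show (List.foldl _ p.2 _).2 = pvScanT lbl (p :: l)
      rw [pvFoldlMin_head p.2 _ hthis]
      simp only [pvScanT]
      rw [if_pos hm]
    · rw [List.filter_cons, if_neg hm]
      simp only [pvScanT]
      rw [if_neg hm]
      exact ih hpl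

-- distributing an if over a disjunctive guard whose branches agree
theorem pv_if_or {α : Type} (c d : Prop) [Decidable c] [Decidable d] (x y : α) :
    (if c ∨ d then x else y) = if c then x else if d then x else y := by
  by_cases hc : c <;> by_cases hd : d <;> simp [hc, hd]

-- ===== VERDICT (by name: the statement is the Claim_ definition above) =====
set_option maxHeartbeats 2000000 in
theorem match_svg_icon_py_spec : Claim_equal_match_svg_icon_py := by
  intro label _
  unfold Spec_match_svg_icon_py match_svg_icon_py match_svg_icon_py_alt
  rw [pvKeys_eq]
  rw [pvMin_eq_scan (PySem.Str.lower label) pvKeywordTable pvTable_pairwise]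
  simp only [pvALoop, pvAFallback, pvScanT, pvKeywordTable, List.any_cons, List.any_nil,
    Bool.or_false, Bool.or_eq_true, pv_if_or]
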